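-- pv_equiv track=rewrite | github.com/astudentfromsustech/Thesis_project | 2_AB_compartments_level/codes/8_domain_cluster_WT_HS_forIGV.py | find_connected_groups
-- ===== SOURCE A (Python) =====
-- def find_connected_groups(edges):
--     # Helper function to find all connected nodes starting from a specific node
--     def dfs(node, group, edge_dict):
--         for neighbor in edge_dict[node]:
--             if neighbor not in group:
--                 group.add(neighbor)
--                 dfs(neighbor, group, edge_dict)
--
--     # Create a dictionary where each node points to its neighbors
--     edge_dict = {}
--     for edge in edges:
--         if edge[0] not in edge_dict:
--             edge_dict[edge[0]] = set()
--         if edge[1] not in edge_dict: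
--             edge_dict[edge[1]] = set()
--         edge_dict[edge[0]].add(edge[1])
--         edge_dict[edge[1]].add(edge[0])
--
--     # Set of all nodes that have already been visited
--     visited = set()
--     # List of all connected groups
--     groups = []
--
--     # Iterate over all nodes
--     for node in edge_dict:
--         if node not in visited:
--             # Start a new group and perform DFS
--             group = set()
--             dfs(node, group, edge_dict)
--             # After DFS, all connected nodes are in 'group'
--             groups.append(group)
--             # Mark all as visited
--             visited.update(group)
--
--     # Convert the sets of groups to lists of lists (pairs)
--     group_pairs = []
--     for group in groups:
--         # Sort the group to maintain consistent order
--         group = sorted(group)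
--         pairs = []
--         for node in group:
--             # For each node, find all pairs it participates in (node is the smaller end of the pair)
--             for connected_node in edge_dict[node]:
--                 # Since we sorted the group, ensure we only take pairs in the correct order
--                 if node < connected_node:
--                     pairs.append([node, connected_node])
--         # Sort pairs and append to the final result
--         group_pairs.append(sorted(pairs, key=lambda x: (x[0], x[1])))
--     return group_pairs
-- ===== SOURCE B (Python) =====
-- def find_connected_groups(edges):
--     # BFS over the raw edge list with an explicit queue: no adjacency dict, no recursion.
--     order = []
--     seen = set()
--     for e in edges:
--         for x in (e[0], e[1]):
--             if x not in seen:
--                 seen.add(x)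
--                 order.append(x)
--     comps = []
--     done = set()
--     for n in order:
--         if n in done:
--             continue
--         comp = {n}
--         queue = [n]
--         while queue:
--             u = queue.pop(0)
--             for e in edges:
--                 a, b = e[0], e[1]
--                 if a == u and b not in comp:
--                     comp.add(b)
--                     queue.append(b)
--                 if b == u and a not in comp:
--                     comp.add(a)
--                     queue.append(a)
--         done |= comp
--         comps.append(comp)
--     res = []
--     for comp in comps:
--         ps = set()
--         for e in edges:
--             a, b = e[0], e[1]
--             if a != b and a in comp:
--                 ps.add((min(a, b), max(a, b)))
--         res.append([[p, q] for p, q in sorted(ps)])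
--     return res
-- ===== Notes on version B (the rewrite author's own statement) =====
-- stated objective: alternative
-- what changed: B replaces A's recursive DFS over an adjacency dictionary with a queue-based BFS that discovers neighbours by scanning the raw edge list, and builds each component's sorted pair list by one filtered pass over the edges instead of A's per-node adjacency scan.
import Mathlib
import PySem

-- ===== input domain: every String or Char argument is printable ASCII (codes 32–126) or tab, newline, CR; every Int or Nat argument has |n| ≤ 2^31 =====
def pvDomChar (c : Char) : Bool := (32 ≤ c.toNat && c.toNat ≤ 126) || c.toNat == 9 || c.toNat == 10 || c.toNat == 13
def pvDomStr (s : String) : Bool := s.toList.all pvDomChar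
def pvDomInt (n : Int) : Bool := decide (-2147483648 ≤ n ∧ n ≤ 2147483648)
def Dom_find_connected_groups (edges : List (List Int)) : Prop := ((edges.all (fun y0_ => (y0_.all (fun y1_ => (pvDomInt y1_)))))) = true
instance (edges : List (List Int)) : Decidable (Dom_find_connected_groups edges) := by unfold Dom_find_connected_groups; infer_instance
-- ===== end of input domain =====

-- B replaces A's recursive DFS over an adjacency dictionary by a queue-based BFS over the raw
-- edge list, and collects each component's normalized pairs by one filtered scan of the edges
-- (objective: alternative — a different traversal and data structure, not claimed faster).

-- ===== PORT A =====
-- edge[0] / edge[1]; total form, exact whenever the edge has ≥ 2 entries (guaranteed by Pre_)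
def pvFst (e : List Int) : Int := (PySem.List.pyGet? e 0).getD 0
def pvSnd (e : List Int) : Int := (PySem.List.pyGet? e 1).getD 0

-- one iteration of A's edge_dict-building loop
def pvBuild1 (d : PySem.Dict Int (PySem.Set Int)) (e : List Int) : PySem.Dict Int (PySem.Set Int) :=
  let d1 := if d.contains (pvFst e) then d else d.insert (pvFst e) PySem.Set.empty
  let d2 := if d1.contains (pvSnd e) then d1 else d1.insert (pvSnd e) PySem.Set.empty
  let d3 := d2.modify (pvFst e) PySem.Set.empty (fun s => PySem.Set.add s (pvSnd e))
  d3.modify (pvSnd e) PySem.Set.empty (fun s => PySem.Set.add s (pvFst e))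

def pvEdgeDict (edges : List (List Int)) : PySem.Dict Int (PySem.Set Int) :=
  edges.foldl pvBuild1 PySem.Dict.empty

-- A's recursive dfs; the fuel only makes the recursion structural, it never runs out
-- (the number of dict keys + 1 bounds the recursion depth)
def pvDfs (d : PySem.Dict Int (PySem.Set Int)) : Nat → Int → PySem.Set Int → PySem.Set Int
  | 0, _, g => g
  | fuel+1, node, g =>
    (d.getD node PySem.Set.empty).foldl
      (fun g2 nb => if nb ∈ g2 then g2 else pvDfs d fuel nb (PySem.Set.add g2 nb)) g

-- A's visited/groups loop over the dict keys
def pvGroupsA (d : PySem.Dict Int (PySem.Set Int)) : List (PySem.Set Int) :=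
  (d.keys.foldl (fun (acc : List (PySem.Set Int) × PySem.Set Int) node =>
    if node ∈ acc.2 then acc
    else
      let g := pvDfs d (d.keys.length + 1) node PySem.Set.empty
      (acc.1 ++ [g], PySem.Set.update acc.2 g)) ([], PySem.Set.empty)).1

-- A's per-group pair collection (sorted nodes, adjacency scan, node < neighbor)
def pvPairsA (d : PySem.Dict Int (PySem.Set Int)) (g : PySem.Set Int) : List (List Int) :=
  (PySem.List.sorted g (fun x => x)).foldl (fun ps node =>
    (d.getD node PySem.Set.empty).foldl (fun ps2 nb =>
      if node < nb then ps2 ++ [[node, nb]] else ps2) ps) []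

def find_connected_groups (edges : List (List Int)) : List (List (List Int)) :=
  let d := pvEdgeDict edges
  (pvGroupsA d).foldl (fun acc g =>
    acc ++ [PySem.List.sorted2 (pvPairsA d g)
      (fun x => PySem.List.pyGetD x 0 0) (fun x => PySem.List.pyGetD x 1 0)]) []

-- ===== PORT B =====
-- first-appearance order of the nodes (Source B's order/seen loop)
def pvOrderFold (edges : List (List Int)) : List Int × PySem.Set Int :=
  edges.foldl (fun acc e =>
    [pvFst e, pvSnd e].foldl (fun (acc2 : List Int × PySem.Set Int) x =>
      if x ∈ acc2.2 then acc2 else (acc2.1 ++ [x], PySem.Set.add acc2.2 x)) acc) ([], PySem.Set.empty)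

-- one edge examined while node u is being expanded (Source B's inner for loop)
def pvBfsStep (u : Int) (s : PySem.Set Int × List Int) (e : List Int) : PySem.Set Int × List Int :=
  let s1 := if pvFst e = u ∧ pvSnd e ∉ s.1 then (PySem.Set.add s.1 (pvSnd e), s.2 ++ [pvSnd e]) else s
  if pvSnd e = u ∧ pvFst e ∉ s1.1 then (PySem.Set.add s1.1 (pvFst e), s1.2 ++ [pvFst e]) else s1

-- Source B's while-queue loop; the fuel only makes the loop structural, it never runs out
-- (1 + the number of distinct nodes bounds the number of pops)
def pvBfs (edges : List (List Int)) : Nat → List Int → PySem.Set Int → PySem.Set Int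
  | 0, _, comp => comp
  | _+1, [], comp => comp
  | fuel+1, u :: queue, comp =>
    let s := edges.foldl (fun s e => pvBfsStep u s e) (comp, queue)
    pvBfs edges fuel s.2 s.1

-- Source B's comps/done loop
def pvCompsB (edges : List (List Int)) (order : List Int) : List (PySem.Set Int) :=
  (order.foldl (fun (acc : List (PySem.Set Int) × PySem.Set Int) n =>
    if n ∈ acc.2 then acc
    else
      let c := pvBfs edges (order.length + 1) [n] (PySem.Set.add PySem.Set.empty n)
      (acc.1 ++ [c], PySem.Set.union acc.2 c)) ([], PySem.Set.empty)).1

-- Source B's per-component pair set, one filtered scan of the edges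
def pvPairsB (edges : List (List Int)) (comp : PySem.Set Int) : PySem.Set (Int × Int) :=
  edges.foldl (fun ps e =>
    if pvFst e ≠ pvSnd e ∧ pvFst e ∈ comp
    then PySem.Set.add ps (min (pvFst e) (pvSnd e), max (pvFst e) (pvSnd e)) else ps) PySem.Set.empty

def find_connected_groups_alt (edges : List (List Int)) : List (List (List Int)) :=
  let order := (pvOrderFold edges).1
  (pvCompsB edges order).map (fun comp =>
    (PySem.List.sorted2 (pvPairsB edges comp) (fun p => p.1) (fun p => p.2)).map
      (fun p => [p.1, p.2]))

-- ===== PRECONDITION & SPEC =====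
-- Pre_ excludes exactly the inputs on which A raises IndexError: an edge with fewer than two entries.
def Pre_find_connected_groups (edges : List (List Int)) : Prop := ∀ e ∈ edges, 2 ≤ e.length
instance (edges : List (List Int)) : Decidable (Pre_find_connected_groups edges) := by
  unfold Pre_find_connected_groups; infer_instance

def pvWitness_find_connected_groups : List (List Int) := [[1, 2], [2, 3], [5, 5], [0, 7]]

def Spec_find_connected_groups (edges : List (List Int)) (out : List (List (List Int))) : Prop := out = find_connected_groups_alt edges
instance (edges : List (List Int)) (out : List (List (List Int))) : Decidable (Spec_find_connected_groups edges out) := by unfold Spec_find_connected_groups; infer_instance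

-- ===== CLAIM (what is proved, stated in full; the proofs are below) =====
def Claim_equal_find_connected_groups : Prop := ∀ (edges : List (List Int)), Dom_find_connected_groups edges → Pre_find_connected_groups edges → Spec_find_connected_groups edges (find_connected_groups edges)

-- ===== LEMMAS AND PROOFS =====

-- the edge relation, reachability, the node list and the adjacency sets
def pvStep (edges : List (List Int)) (x y : Int) : Prop :=
  ∃ e ∈ edges, (pvFst e = x ∧ pvSnd e = y) ∨ (pvFst e = y ∧ pvSnd e = x)

def pvConn (edges : List (List Int)) : Int → Int → Prop :=
  fun x y => Relation.ReflTransGen (pvStep edges) x y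

def pvNodes (edges : List (List Int)) : List Int := (pvEdgeDict edges).keys

def pvAdj (edges : List (List Int)) (x : Int) : PySem.Set Int :=
  (pvEdgeDict edges).getD x PySem.Set.empty

def pvFlat (edges : List (List Int)) : List Int := edges.flatMap (fun e => [pvFst e, pvSnd e])

theorem pvStep_symm {E : List (List Int)} {x y : Int} (h : pvStep E x y) : pvStep E y x := by
  obtain ⟨e, he, h⟩ := h
  exact ⟨e, he, by tauto⟩

theorem pvConn_step {E : List (List Int)} {n x y : Int} (h : pvConn E n x) (hs : pvStep E x y) :
    pvConn E n y := Relation.ReflTransGen.tail h hs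

-- ---- edge_dict characterization ----
theorem pvEnsure_getD (d : PySem.Dict Int (PySem.Set Int)) (k x : Int) :
    (if d.contains k then d else d.insert k PySem.Set.empty).getD x PySem.Set.empty
      = d.getD x PySem.Set.empty := by
  by_cases h : d.contains k = true
  · simp [h]
  · simp only [h, Bool.false_eq_true, if_false]
    rw [PySem.Dict.getD_insert]
    split
    · next heq =>
      subst heq
      rw [PySem.Dict.getD_of_not_contains]
      simpa using h
    · rfl

theorem pvListContains_false {A : Type} [BEq A] [LawfulBEq A] {l : List A} {x : A}
    (h : x ∉ l) : l.contains x = false := by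
  cases hcb : l.contains x with
  | false => rfl
  | true => exact absurd (List.contains_iff_mem.1 hcb) h

theorem pvDictContains_false {d : PySem.Dict Int (PySem.Set Int)} {k : Int}
    (h : k ∉ d.keys) : d.contains k = false := by
  cases hcb : d.contains k with
  | false => rfl
  | true => exact absurd ((PySem.Dict.contains_iff_mem_keys d k).1 hcb) h

theorem pvEnsure_keys (d : PySem.Dict Int (PySem.Set Int)) (k : Int) :
    (if d.contains k then d else d.insert k PySem.Set.empty).keys
      = PySem.Set.add d.keys k := by
  by_cases h : k ∈ d.keys
  · have hc : d.contains k = true := (PySem.Dict.contains_iff_mem_keys d k).2 h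
    simp [hc, PySem.Set.add, h]
  · have hc : d.contains k = false := pvDictContains_false h
    simp [hc, PySem.Set.add, h, PySem.Dict.keys_insert_of_not_contains d _ hc]

theorem pvModify_keys (d : PySem.Dict Int (PySem.Set Int)) (k : Int) (f : PySem.Set Int → PySem.Set Int)
    (h : k ∈ d.keys) : (d.modify k PySem.Set.empty f).keys = d.keys := by
  rw [PySem.Dict.keys_modify]
  exact PySem.Dict.keys_insert_of_contains d _ ((PySem.Dict.contains_iff_mem_keys d k).2 h)

theorem pvBuild1_getD (d : PySem.Dict Int (PySem.Set Int)) (e : List Int) (x y : Int) :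
    y ∈ (pvBuild1 d e).getD x PySem.Set.empty ↔
      y ∈ d.getD x PySem.Set.empty ∨ (pvFst e = x ∧ pvSnd e = y) ∨ (pvFst e = y ∧ pvSnd e = x) := by
  unfold pvBuild1
  simp only [PySem.Dict.getD_modify, pvEnsure_getD]
  split_ifs <;> simp_all [PySem.Set.mem_add] <;> tauto

theorem pvBuild1_keys (d : PySem.Dict Int (PySem.Set Int)) (e : List Int) :
    (pvBuild1 d e).keys = PySem.Set.update d.keys [pvFst e, pvSnd e] := by
  unfold pvBuild1
  simp only []
  rw [pvModify_keys, pvModify_keys, pvEnsure_keys, pvEnsure_keys]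
  · simp [PySem.Set.update]
  · rw [pvEnsure_keys, pvEnsure_keys, PySem.Set.mem_add]
    left
    exact (PySem.Set.mem_add _ _ _).2 (Or.inr rfl)
  · rw [pvModify_keys, pvEnsure_keys, pvEnsure_keys, PySem.Set.mem_add]
    · exact Or.inr rfl
    · rw [pvEnsure_keys, pvEnsure_keys, PySem.Set.mem_add]
      left
      exact (PySem.Set.mem_add _ _ _).2 (Or.inr rfl)

theorem pvBuild1_nodupVals (d : PySem.Dict Int (PySem.Set Int)) (e : List Int)
    (h : ∀ x, (d.getD x PySem.Set.empty).Nodup) :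
    ∀ x, ((pvBuild1 d e).getD x PySem.Set.empty).Nodup := by
  intro x
  unfold pvBuild1
  simp only [PySem.Dict.getD_modify, pvEnsure_getD]
  split_ifs <;> first
    | exact PySem.Set.nodup_add _ _ (PySem.Set.nodup_add _ _ (h _))
    | exact PySem.Set.nodup_add _ _ (h _)
    | exact h _

theorem pvEdgeDictFold_getD :
    ∀ (L : List (List Int)) (d : PySem.Dict Int (PySem.Set Int)) (x y : Int),
      y ∈ (L.foldl pvBuild1 d).getD x PySem.Set.empty ↔
        y ∈ d.getD x PySem.Set.empty ∨ pvStep L x y := by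
  intro L
  induction L with
  | nil => intro d x y; simp [pvStep]
  | cons e t ih =>
    intro d x y
    rw [List.foldl_cons, ih, pvBuild1_getD]
    simp only [pvStep, List.mem_cons]
    constructor
    · rintro ((h | h) | ⟨e', he', h⟩)
      · exact Or.inl h
      · exact Or.inr ⟨e, Or.inl rfl, h⟩
      · exact Or.inr ⟨e', Or.inr he', h⟩
    · rintro (h | ⟨e', (rfl | he'), h⟩)
      · exact Or.inl (Or.inl h)
      · exact Or.inl (Or.inr h)
      · exact Or.inr ⟨e', he', h⟩

theorem pvEdgeDict_getD (E : List (List Int)) (x y : Int) :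
    y ∈ pvAdj E x ↔ pvStep E x y := by
  unfold pvAdj pvEdgeDict
  rw [pvEdgeDictFold_getD]
  simp [PySem.Dict.getD_empty, PySem.Set.empty]

theorem pvEdgeDictFold_keys :
    ∀ (L : List (List Int)) (d : PySem.Dict Int (PySem.Set Int)),
      (L.foldl pvBuild1 d).keys = PySem.Set.update d.keys (pvFlat L) := by
  intro L
  induction L with
  | nil => intro d; simp [pvFlat, PySem.Set.update]
  | cons e t ih =>
    intro d
    rw [List.foldl_cons, ih, pvBuild1_keys]
    have h : pvFlat (e :: t) = [pvFst e, pvSnd e] ++ pvFlat t := by simp [pvFlat]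
    rw [h]
    simp [PySem.Set.update, List.foldl_append]

theorem pvNodes_eq (E : List (List Int)) : pvNodes E = PySem.Set.ofList (pvFlat E) := by
  unfold pvNodes pvEdgeDict
  rw [pvEdgeDictFold_keys]
  rfl

theorem pvMem_nodes (E : List (List Int)) (x : Int) :
    x ∈ pvNodes E ↔ ∃ e ∈ E, x = pvFst e ∨ x = pvSnd e := by
  rw [pvNodes_eq, PySem.Set.mem_ofList, pvFlat]
  simp [List.mem_flatMap]

theorem pvEdgeDictFold_nodupVals :
    ∀ (L : List (List Int)) (d : PySem.Dict Int (PySem.Set Int)),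
      (∀ x, (d.getD x PySem.Set.empty).Nodup) →
      ∀ x, ((L.foldl pvBuild1 d).getD x PySem.Set.empty).Nodup := by
  intro L
  induction L with
  | nil => intro d h; exact h
  | cons e t ih => intro d h; exact ih _ (pvBuild1_nodupVals d e h)

theorem pvAdj_nodup (E : List (List Int)) (x : Int) : (pvAdj E x).Nodup := by
  unfold pvAdj pvEdgeDict
  exact pvEdgeDictFold_nodupVals E PySem.Dict.empty
    (by intro z; simp [PySem.Dict.getD_empty, PySem.Set.empty]) x

theorem pvAdj_symm (E : List (List Int)) (x y : Int) : y ∈ pvAdj E x ↔ x ∈ pvAdj E y := by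
  rw [pvEdgeDict_getD, pvEdgeDict_getD]
  exact ⟨pvStep_symm, pvStep_symm⟩

theorem pvAdj_mem_nodes {E : List (List Int)} {x y : Int} (h : y ∈ pvAdj E x) :
    x ∈ pvNodes E ∧ y ∈ pvNodes E := by
  rw [pvEdgeDict_getD] at h
  obtain ⟨e, he, h⟩ := h
  constructor <;> rw [pvMem_nodes] <;> exact ⟨e, he, by tauto⟩

theorem pvAdj_nonempty {E : List (List Int)} {x : Int} (h : x ∈ pvNodes E) :
    ∃ y, y ∈ pvAdj E x := by
  rw [pvMem_nodes] at h
  obtain ⟨e, he, h⟩ := h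
  rcases h with h | h
  · exact ⟨pvSnd e, (pvEdgeDict_getD E x _).2 ⟨e, he, Or.inl ⟨h.symm, rfl⟩⟩⟩
  · exact ⟨pvFst e, (pvEdgeDict_getD E x _).2 ⟨e, he, Or.inr ⟨rfl, h.symm⟩⟩⟩

-- ---- order list of B = key list of A's dict ----
theorem pvSeenStep (s : PySem.Set Int) (x : Int) :
    (if x ∈ s then ((s : List Int), s) else (s ++ [x], PySem.Set.add s x))
      = (PySem.Set.add s x, PySem.Set.add s x) := by
  by_cases h : x ∈ s
  · have hc : s.contains x = true := List.contains_iff_mem.2 h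
    simp [h, PySem.Set.add, hc]
  · have hc : s.contains x = false := pvListContains_false h
    simp [h, PySem.Set.add, hc]

theorem pvSeenFold (l : List Int) :
    ∀ (s : PySem.Set Int),
      l.foldl (fun (acc2 : List Int × PySem.Set Int) x =>
        if x ∈ acc2.2 then acc2 else (acc2.1 ++ [x], PySem.Set.add acc2.2 x)) (s, s)
        = (PySem.Set.update s l, PySem.Set.update s l) := by
  induction l with
  | nil => intro s; simp [PySem.Set.update]
  | cons x t ih =>
    intro s
    rw [List.foldl_cons]
    have h1 : (if x ∈ ((s, s) : List Int × PySem.Set Int).2 then ((s, s) : List Int × PySem.Set Int)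
        else ((s, s).1 ++ [x], PySem.Set.add (s, s).2 x)) = (PySem.Set.add s x, PySem.Set.add s x) :=
      pvSeenStep s x
    rw [h1, ih]
    simp [PySem.Set.update]

theorem pvOrderFold_eq (E : List (List Int)) : (pvOrderFold E).1 = pvNodes E := by
  unfold pvOrderFold
  have h : ∀ (L : List (List Int)) (s : PySem.Set Int),
      L.foldl (fun acc e =>
        [pvFst e, pvSnd e].foldl (fun (acc2 : List Int × PySem.Set Int) x =>
          if x ∈ acc2.2 then acc2 else (acc2.1 ++ [x], PySem.Set.add acc2.2 x)) acc) (s, s)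
        = (PySem.Set.update s (pvFlat L), PySem.Set.update s (pvFlat L)) := by
    intro L
    induction L with
    | nil => intro s; simp [pvFlat, PySem.Set.update]
    | cons e t ih =>
      intro s
      rw [List.foldl_cons, pvSeenFold, ih]
      have hf : pvFlat (e :: t) = [pvFst e, pvSnd e] ++ pvFlat t := by simp [pvFlat]
      rw [hf]
      simp [PySem.Set.update, List.foldl_append]
  have h0 : (([], PySem.Set.empty) : List Int × PySem.Set Int)
      = ((PySem.Set.empty : PySem.Set Int), (PySem.Set.empty : PySem.Set Int)) := rfl
  rw [h0, h E PySem.Set.empty, pvNodes_eq]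
  rfl

-- ---- counting helpers for the fuel bounds ----
theorem pvFilterMono (l : List Int) (p q : Int → Bool) (h : ∀ x ∈ l, p x = true → q x = true) :
    (l.filter p).length ≤ (l.filter q).length := by
  induction l with
  | nil => simp
  | cons a t ih =>
    have ht := ih (fun x hx => h x (List.mem_cons_of_mem a hx))
    by_cases hp : p a = true <;> by_cases hq : q a = true <;>
      simp_all [List.filter_cons] <;> omega

theorem pvFilterLt (l : List Int) (p q : Int → Bool) (h : ∀ x ∈ l, p x = true → q x = true)
    (x : Int) (hx : x ∈ l) (hq : q x = true) (hp : p x = false) :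
    (l.filter p).length < (l.filter q).length := by
  induction l with
  | nil => simp at hx
  | cons a t ih =>
    have hmono := pvFilterMono t p q (fun z hz => h z (List.mem_cons_of_mem a hz))
    rcases List.mem_cons.1 hx with rfl | hx'
    · simp [List.filter_cons, hp, hq]
      omega
    · have := ih (fun z hz => h z (List.mem_cons_of_mem a hz)) hx'
      by_cases hpa : p a = true <;> by_cases hqa : q a = true <;>
        simp_all [List.filter_cons] <;> omega

theorem pvCountAddLt (K : List Int) (c : PySem.Set Int) (x : Int) (hx : x ∈ K) (hxc : x ∉ c) :
    (K.filter (fun y => !decide (y ∈ PySem.Set.add c x))).length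
      < (K.filter (fun y => !decide (y ∈ c))).length := by
  refine pvFilterLt K _ _ ?_ x hx ?_ ?_
  · intro z _ hz
    simp only [Bool.not_eq_true', decide_eq_false_iff_not] at hz ⊢
    intro hzc
    exact hz ((PySem.Set.mem_add c x z).2 (Or.inl hzc))
  · simp [hxc]
  · simp [PySem.Set.mem_add]

-- ---- A's dfs computes reachability ----
theorem pvDfs_mono (E : List (List Int)) :
    ∀ (f : Nat) (n : Int) (g : PySem.Set Int) (x : Int), x ∈ g → x ∈ pvDfs (pvEdgeDict E) f n g := by
  intro f
  induction f with
  | zero => intro n g x hx; simpa [pvDfs] using hx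
  | succ f ih =>
    intro n g x hx
    simp only [pvDfs]
    generalize ((pvEdgeDict E).getD n PySem.Set.empty) = l
    induction l generalizing g with
    | nil => simpa using hx
    | cons nb t iht =>
      rw [List.foldl_cons]
      by_cases hnb : nb ∈ g
      · simp only [hnb, if_pos]
        exact iht g hx
      · simp only [hnb, if_false]
        exact iht _ (ih nb _ x ((PySem.Set.mem_add g nb x).2 (Or.inl hx)))

theorem pvDfsFold_mono (E : List (List Int)) (f : Nat) (l : List Int) :
    ∀ (g : PySem.Set Int) (x : Int), x ∈ g →
      x ∈ l.foldl (fun g2 nb => if nb ∈ g2 then g2 else pvDfs (pvEdgeDict E) f nb (PySem.Set.add g2 nb)) g := by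
  induction l with
  | nil => intro g x hx; simpa using hx
  | cons nb t ih =>
    intro g x hx
    rw [List.foldl_cons]
    by_cases hnb : nb ∈ g
    · simp only [hnb, if_pos]; exact ih g x hx
    · simp only [hnb, if_false]
      exact ih _ x (pvDfs_mono E f nb _ x ((PySem.Set.mem_add g nb x).2 (Or.inl hx)))

theorem pvDfs_sound (E : List (List Int)) :
    ∀ (f : Nat) (n : Int) (g : PySem.Set Int) (m : Int),
      m ∈ pvDfs (pvEdgeDict E) f n g → m ∈ g ∨ pvConn E n m := by
  intro f
  induction f with
  | zero => intro n g m hm; simp [pvDfs] at hm; exact Or.inl hm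
  | succ f ih =>
    intro n g m hm
    simp only [pvDfs] at hm
    suffices hgen : ∀ (l : List Int), (∀ nb ∈ l, pvStep E n nb) → ∀ (g : PySem.Set Int),
        m ∈ l.foldl (fun g2 nb => if nb ∈ g2 then g2 else pvDfs (pvEdgeDict E) f nb (PySem.Set.add g2 nb)) g →
        m ∈ g ∨ pvConn E n m by
      exact hgen _ (fun nb hnb => (pvEdgeDict_getD E n nb).1 hnb) g hm
    intro l
    induction l with
    | nil => intro _ g' hm'; exact Or.inl (by simpa using hm')
    | cons nb t iht =>
      intro hl g' hm'
      rw [List.foldl_cons] at hm'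
      have hlt : ∀ z ∈ t, pvStep E n z := fun z hz => hl z (List.mem_cons_of_mem nb hz)
      by_cases hnb : nb ∈ g'
      · simp only [hnb, if_pos] at hm'
        exact iht hlt g' hm'
      · simp only [hnb, if_false] at hm'
        rcases iht hlt _ hm' with hm'' | hm''
        · rcases ih nb _ m hm'' with hm3 | hm3
          · rcases (PySem.Set.mem_add g' nb m).1 hm3 with h | rfl
            · exact Or.inl h
            · exact Or.inr (Relation.ReflTransGen.single (hl m List.mem_cons_self))
          · exact Or.inr (Relation.ReflTransGen.trans
              (Relation.ReflTransGen.single (hl nb List.mem_cons_self)) hm3)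
        · exact Or.inr hm''

theorem pvDfs_nodup (E : List (List Int)) :
    ∀ (f : Nat) (n : Int) (g : PySem.Set Int), g.Nodup → (pvDfs (pvEdgeDict E) f n g).Nodup := by
  intro f
  induction f with
  | zero => intro n g hg; simpa [pvDfs] using hg
  | succ f ih =>
    intro n g hg
    simp only [pvDfs]
    generalize ((pvEdgeDict E).getD n PySem.Set.empty) = l
    induction l generalizing g with
    | nil => simpa using hg
    | cons nb t iht =>
      rw [List.foldl_cons]
      by_cases hnb : nb ∈ g
      · simp only [hnb, if_pos]; exact iht g hg
      · simp only [hnb, if_false]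
        exact iht _ (ih nb _ (PySem.Set.nodup_add g nb hg))

theorem pvDfs_closed (E : List (List Int)) :
    ∀ (f : Nat) (n : Int) (g : PySem.Set Int),
      n ∈ pvNodes E →
      ((pvNodes E).filter (fun y => !decide (y ∈ g))).length < f →
      (∀ y ∈ pvAdj E n, y ∈ pvDfs (pvEdgeDict E) f n g) ∧
      (∀ m, m ∈ pvDfs (pvEdgeDict E) f n g → m ∉ g →
        m ∈ pvNodes E ∧ ∀ y ∈ pvAdj E m, y ∈ pvDfs (pvEdgeDict E) f n g) := by
  intro f
  induction f with
  | zero => intro n g _ hf; simp at hf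
  | succ f ih =>
    intro n g hn hf
    simp only [pvDfs]
    have hsubK : ∀ nb ∈ pvAdj E n, nb ∈ pvNodes E := fun nb hnb => (pvAdj_mem_nodes hnb).2
    suffices h : ∀ (l : List Int), (∀ nb ∈ l, nb ∈ pvNodes E) →
        ∀ (g' : PySem.Set Int),
          (∀ x ∈ g, x ∈ g') →
          (∀ m ∈ g', m ∉ g → m ∈ pvNodes E ∧ ∀ y ∈ pvAdj E m, y ∈ g') →
          ((pvNodes E).filter (fun y => !decide (y ∈ g'))).length < f + 1 →
          (∀ nb ∈ l, nb ∈ l.foldl (fun g2 nb => if nb ∈ g2 then g2 else pvDfs (pvEdgeDict E) f nb (PySem.Set.add g2 nb)) g') ∧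
          (∀ m, m ∈ l.foldl (fun g2 nb => if nb ∈ g2 then g2 else pvDfs (pvEdgeDict E) f nb (PySem.Set.add g2 nb)) g' → m ∉ g →
            m ∈ pvNodes E ∧ ∀ y ∈ pvAdj E m, y ∈ l.foldl (fun g2 nb => if nb ∈ g2 then g2 else pvDfs (pvEdgeDict E) f nb (PySem.Set.add g2 nb)) g') by
      have h' := h (pvAdj E n) hsubK g (fun x hx => hx)
        (fun m hm hm' => absurd hm hm') hf
      exact ⟨h'.1, h'.2⟩
    intro l
    induction l with
    | nil =>
      intro _ g' hmono hinv _
      refine ⟨by simp, ?_⟩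
      intro m hm hmg
      simp only [List.foldl_nil] at hm ⊢
      exact hinv m hm hmg
    | cons nb t iht =>
      intro hlK g' hmono hinv hfuel
      have htK : ∀ z ∈ t, z ∈ pvNodes E := fun z hz => hlK z (List.mem_cons_of_mem nb hz)
      by_cases hnb : nb ∈ g'
      · rw [List.foldl_cons]
        simp only [hnb, if_pos]
        obtain ⟨h1, h2⟩ := iht htK g' hmono hinv hfuel
        refine ⟨?_, h2⟩
        intro z hz
        rcases List.mem_cons.1 hz with rfl | hz'
        · exact pvDfsFold_mono E f t g' z hnb
        · exact h1 z hz'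
      · rw [List.foldl_cons]
        simp only [hnb, if_false]
        have hnbK : nb ∈ pvNodes E := hlK nb List.mem_cons_self
        have hfuel2 : ((pvNodes E).filter (fun y => !decide (y ∈ PySem.Set.add g' nb))).length < f := by
          have := pvCountAddLt (pvNodes E) g' nb hnbK hnb
          omega
        obtain ⟨ha, hb⟩ := ih nb (PySem.Set.add g' nb) hnbK hfuel2
        set G := pvDfs (pvEdgeDict E) f nb (PySem.Set.add g' nb) with hG
        have hmonoG : ∀ x ∈ g', x ∈ G := by
          intro x hx
          exact pvDfs_mono E f nb _ x ((PySem.Set.mem_add g' nb x).2 (Or.inl hx))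
        have hnbG : nb ∈ G := pvDfs_mono E f nb _ nb ((PySem.Set.mem_add g' nb nb).2 (Or.inr rfl))
        have hinvG : ∀ m ∈ G, m ∉ g → m ∈ pvNodes E ∧ ∀ y ∈ pvAdj E m, y ∈ G := by
          intro m hm hmg
          by_cases hmadd : m ∈ PySem.Set.add g' nb
          · rcases (PySem.Set.mem_add g' nb m).1 hmadd with hmg' | rfl
            · obtain ⟨hK', hcl'⟩ := hinv m hmg' hmg
              exact ⟨hK', fun y hy => hmonoG y (hcl' y hy)⟩
            · exact ⟨hnbK, fun y hy => ha y hy⟩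
          · exact hb m hm hmadd
        have hfuelG : ((pvNodes E).filter (fun y => !decide (y ∈ G))).length < f + 1 := by
          have hle : ((pvNodes E).filter (fun y => !decide (y ∈ G))).length
              ≤ ((pvNodes E).filter (fun y => !decide (y ∈ PySem.Set.add g' nb))).length := by
            apply pvFilterMono
            intro z _ hz
            simp only [Bool.not_eq_true', decide_eq_false_iff_not] at hz ⊢
            intro hzc
            exact hz (pvDfs_mono E f nb _ z hzc)
          omega
        obtain ⟨h1, h2⟩ := iht htK G (fun x hx => hmonoG x (hmono x hx)) hinvG hfuelG
        refine ⟨?_, h2⟩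
        intro z hz
        rcases List.mem_cons.1 hz with rfl | hz'
        · exact pvDfsFold_mono E f t G z hnbG
        · exact h1 z hz'

theorem pvDfs_mem (E : List (List Int)) (n : Int) (hn : n ∈ pvNodes E) (m : Int) :
    m ∈ pvDfs (pvEdgeDict E) ((pvNodes E).length + 1) n PySem.Set.empty ↔ pvConn E n m := by
  constructor
  · intro h
    rcases pvDfs_sound E _ n _ m h with h' | h'
    · simp [PySem.Set.empty] at h'
    · exact h'
  · have hf : ((pvNodes E).filter (fun y => !decide (y ∈ (PySem.Set.empty : PySem.Set Int)))).length
        < (pvNodes E).length + 1 := by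
      have := List.length_filter_le (fun y => !decide (y ∈ (PySem.Set.empty : PySem.Set Int))) (pvNodes E)
      omega
    obtain ⟨hadj, hclose⟩ := pvDfs_closed E ((pvNodes E).length + 1) n PySem.Set.empty hn hf
    have hmemG : ∀ x, x ∈ pvDfs (pvEdgeDict E) ((pvNodes E).length + 1) n PySem.Set.empty →
        ∀ y ∈ pvAdj E x, y ∈ pvDfs (pvEdgeDict E) ((pvNodes E).length + 1) n PySem.Set.empty := by
      intro x hx y hy
      exact (hclose x hx (by simp [PySem.Set.empty])).2 y hy
    have hnG : n ∈ pvDfs (pvEdgeDict E) ((pvNodes E).length + 1) n PySem.Set.empty := by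
      obtain ⟨nb, hnb⟩ := pvAdj_nonempty hn
      exact hmemG nb (hadj nb hnb) n ((pvAdj_symm E n nb).1 hnb)
    intro h
    induction h with
    | refl => exact hnG
    | tail hab hbc ihc =>
      exact hmemG _ ihc _ ((pvEdgeDict_getD E _ _).2 hbc)

-- ---- B's BFS computes reachability ----
theorem pvBfsStep_spec (E : List (List Int)) (u : Int) (c : PySem.Set Int) (q : List Int)
    (e : List Int) (he : e ∈ E) :
    (∀ x ∈ c, x ∈ (pvBfsStep u (c, q) e).1) ∧
    (∀ m, m ∈ (pvBfsStep u (c, q) e).1 ↔ m ∈ c ∨ ((pvFst e = u ∧ pvSnd e = m) ∨ (pvSnd e = u ∧ pvFst e = m))) ∧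
    (∀ x, x ∈ (pvBfsStep u (c, q) e).2 ↔ x ∈ q ∨ (x ∈ (pvBfsStep u (c, q) e).1 ∧ x ∉ c)) ∧
    ((pvBfsStep u (c, q) e).2.length + ((pvNodes E).filter (fun y => !decide (y ∈ (pvBfsStep u (c, q) e).1))).length
      ≤ q.length + ((pvNodes E).filter (fun y => !decide (y ∈ c))).length) ∧
    (c.Nodup → (pvBfsStep u (c, q) e).1.Nodup) := by
  have haK : pvFst e ∈ pvNodes E := (pvMem_nodes E _).2 ⟨e, he, Or.inl rfl⟩
  have hbK : pvSnd e ∈ pvNodes E := (pvMem_nodes E _).2 ⟨e, he, Or.inr rfl⟩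
  unfold pvBfsStep
  by_cases h1 : pvFst e = u ∧ pvSnd e ∉ c
  · rw [if_pos h1]
    by_cases h2 : pvSnd e = u ∧ pvFst e ∉ PySem.Set.add c (pvSnd e)
    · rw [if_pos h2]
      have hfc : pvFst e ∉ c := fun hc' => h2.2 ((PySem.Set.mem_add _ _ _).2 (Or.inl hc'))
      refine ⟨?_, ?_, ?_, ?_, ?_⟩
      · intro x hx
        exact (PySem.Set.mem_add _ _ _).2 (Or.inl ((PySem.Set.mem_add _ _ _).2 (Or.inl hx)))
      · intro m
        constructor
        · intro hm
          rcases (PySem.Set.mem_add _ _ _).1 hm with hm' | rfl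
          · rcases (PySem.Set.mem_add _ _ _).1 hm' with hm'' | rfl
            · exact Or.inl hm''
            · exact Or.inr (Or.inl ⟨h1.1, rfl⟩)
          · exact Or.inr (Or.inr ⟨h2.1, rfl⟩)
        · rintro (hm | ⟨_, rfl⟩ | ⟨_, rfl⟩)
          · exact (PySem.Set.mem_add _ _ _).2 (Or.inl ((PySem.Set.mem_add _ _ _).2 (Or.inl hm)))
          · exact (PySem.Set.mem_add _ _ _).2 (Or.inl ((PySem.Set.mem_add _ _ _).2 (Or.inr rfl)))
          · exact (PySem.Set.mem_add _ _ _).2 (Or.inr rfl)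
      · intro x
        constructor
        · intro hx
          rcases List.mem_append.1 hx with hx' | hx'
          · rcases List.mem_append.1 hx' with hx'' | hx''
            · exact Or.inl hx''
            · have : x = pvSnd e := by simpa using hx''
              subst this
              exact Or.inr ⟨(PySem.Set.mem_add _ _ _).2 (Or.inl ((PySem.Set.mem_add _ _ _).2 (Or.inr rfl))), h1.2⟩
          · have : x = pvFst e := by simpa using hx'
            subst this
            exact Or.inr ⟨(PySem.Set.mem_add _ _ _).2 (Or.inr rfl), hfc⟩
        · rintro (hx | ⟨hx1, hx2⟩)
          · exact List.mem_append.2 (Or.inl (List.mem_append.2 (Or.inl hx)))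
          · rcases (PySem.Set.mem_add _ _ _).1 hx1 with hx3 | rfl
            · rcases (PySem.Set.mem_add _ _ _).1 hx3 with hx4 | rfl
              · exact absurd hx4 hx2
              · exact List.mem_append.2 (Or.inl (List.mem_append.2 (Or.inr (by simp))))
            · exact List.mem_append.2 (Or.inr (by simp))
      · have l1 := pvCountAddLt (pvNodes E) c (pvSnd e) hbK h1.2
        have l2 := pvCountAddLt (pvNodes E) (PySem.Set.add c (pvSnd e)) (pvFst e) haK h2.2
        simp only [List.length_append, List.length_cons, List.length_nil]
        omega
      · intro hc'
        exact PySem.Set.nodup_add _ _ (PySem.Set.nodup_add _ _ hc')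
    · rw [if_neg h2]
      push_neg at h2
      refine ⟨?_, ?_, ?_, ?_, ?_⟩
      · intro x hx
        exact (PySem.Set.mem_add _ _ _).2 (Or.inl hx)
      · intro m
        constructor
        · intro hm
          rcases (PySem.Set.mem_add _ _ _).1 hm with hm' | rfl
          · exact Or.inl hm'
          · exact Or.inr (Or.inl ⟨h1.1, rfl⟩)
        · rintro (hm | ⟨_, rfl⟩ | ⟨hsu, rfl⟩)
          · exact (PySem.Set.mem_add _ _ _).2 (Or.inl hm)
          · exact (PySem.Set.mem_add _ _ _).2 (Or.inr rfl)
          · exact h2 hsu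
      · intro x
        constructor
        · intro hx
          rcases List.mem_append.1 hx with hx' | hx'
          · exact Or.inl hx'
          · have : x = pvSnd e := by simpa using hx'
            subst this
            exact Or.inr ⟨(PySem.Set.mem_add _ _ _).2 (Or.inr rfl), h1.2⟩
        · rintro (hx | ⟨hx1, hx2⟩)
          · exact List.mem_append.2 (Or.inl hx)
          · rcases (PySem.Set.mem_add _ _ _).1 hx1 with hx3 | rfl
            · exact absurd hx3 hx2
            · exact List.mem_append.2 (Or.inr (by simp))
      · have l1 := pvCountAddLt (pvNodes E) c (pvSnd e) hbK h1.2
        simp only [List.length_append, List.length_cons, List.length_nil]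
        omega
      · intro hc'
        exact PySem.Set.nodup_add _ _ hc'
  · rw [if_neg h1]
    push_neg at h1
    by_cases h2 : pvSnd e = u ∧ pvFst e ∉ c
    · rw [if_pos h2]
      refine ⟨?_, ?_, ?_, ?_, ?_⟩
      · intro x hx
        exact (PySem.Set.mem_add _ _ _).2 (Or.inl hx)
      · intro m
        constructor
        · intro hm
          rcases (PySem.Set.mem_add _ _ _).1 hm with hm' | rfl
          · exact Or.inl hm'
          · exact Or.inr (Or.inr ⟨h2.1, rfl⟩)
        · rintro (hm | ⟨hfu, rfl⟩ | ⟨_, rfl⟩)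
          · exact (PySem.Set.mem_add _ _ _).2 (Or.inl hm)
          · exact (PySem.Set.mem_add _ _ _).2 (Or.inl (h1 hfu))
          · exact (PySem.Set.mem_add _ _ _).2 (Or.inr rfl)
      · intro x
        constructor
        · intro hx
          rcases List.mem_append.1 hx with hx' | hx'
          · exact Or.inl hx'
          · have : x = pvFst e := by simpa using hx'
            subst this
            exact Or.inr ⟨(PySem.Set.mem_add _ _ _).2 (Or.inr rfl), h2.2⟩
        · rintro (hx | ⟨hx1, hx2⟩)
          · exact List.mem_append.2 (Or.inl hx)
          · rcases (PySem.Set.mem_add _ _ _).1 hx1 with hx3 | rfl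
            · exact absurd hx3 hx2
            · exact List.mem_append.2 (Or.inr (by simp))
      · have l1 := pvCountAddLt (pvNodes E) c (pvFst e) haK h2.2
        simp only [List.length_append, List.length_cons, List.length_nil]
        omega
      · intro hc'
        exact PySem.Set.nodup_add _ _ hc'
    · rw [if_neg h2]
      push_neg at h2
      refine ⟨fun x hx => hx, ?_, ?_, le_refl _, fun hc' => hc'⟩
      · intro m
        constructor
        · intro hm
          exact Or.inl hm
        · rintro (hm | ⟨hfu, rfl⟩ | ⟨hsu, rfl⟩)
          · exact hm
          · exact h1 hfu
          · exact h2 hsu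
      · intro x
        constructor
        · intro hx
          exact Or.inl hx
        · rintro (hx | ⟨hx1, hx2⟩)
          · exact hx
          · exact absurd hx1 hx2

theorem pvBfsScan_spec (E : List (List Int)) (u : Int) :
    ∀ (L : List (List Int)), (∀ e ∈ L, e ∈ E) →
    ∀ (c : PySem.Set Int) (q : List Int),
    (∀ x ∈ c, x ∈ (L.foldl (fun s e => pvBfsStep u s e) (c, q)).1) ∧
    (∀ m, m ∈ (L.foldl (fun s e => pvBfsStep u s e) (c, q)).1 ↔
      m ∈ c ∨ ∃ e ∈ L, (pvFst e = u ∧ pvSnd e = m) ∨ (pvSnd e = u ∧ pvFst e = m)) ∧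
    (∀ x, x ∈ (L.foldl (fun s e => pvBfsStep u s e) (c, q)).2 ↔
      x ∈ q ∨ (x ∈ (L.foldl (fun s e => pvBfsStep u s e) (c, q)).1 ∧ x ∉ c)) ∧
    ((L.foldl (fun s e => pvBfsStep u s e) (c, q)).2.length
        + ((pvNodes E).filter (fun y => !decide (y ∈ (L.foldl (fun s e => pvBfsStep u s e) (c, q)).1))).length
      ≤ q.length + ((pvNodes E).filter (fun y => !decide (y ∈ c))).length) ∧
    (c.Nodup → (L.foldl (fun s e => pvBfsStep u s e) (c, q)).1.Nodup) := by
  intro L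
  induction L with
  | nil =>
    intro _ c q
    refine ⟨fun x hx => hx, ?_, ?_, le_refl _, fun h => h⟩
    · intro m; simp
    · intro x
      constructor
      · exact Or.inl
      · rintro (hx | ⟨hx1, hx2⟩)
        · exact hx
        · exact absurd hx1 hx2
  | cons e t ih =>
    intro hL c q
    obtain ⟨s1i, s1ii, s1iii, s1iv, s1v⟩ := pvBfsStep_spec E u c q e (hL e List.mem_cons_self)
    have hLt : ∀ e' ∈ t, e' ∈ E := fun e' he' => hL e' (List.mem_cons_of_mem e he')
    obtain ⟨t1, t2, t3, t4, t5⟩ := ih hLt (pvBfsStep u (c, q) e).1 (pvBfsStep u (c, q) e).2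
    rw [List.foldl_cons]
    refine ⟨?_, ?_, ?_, ?_, ?_⟩
    · intro x hx
      exact t1 x (s1i x hx)
    · intro m
      constructor
      · intro hm
        rcases (t2 m).1 hm with hm1 | ⟨e', he', hor⟩
        · rcases (s1ii m).1 hm1 with hm2 | hor
          · exact Or.inl hm2
          · exact Or.inr ⟨e, List.mem_cons_self, hor⟩
        · exact Or.inr ⟨e', List.mem_cons_of_mem e he', hor⟩
      · rintro (hm | ⟨e', he', hor⟩)
        · exact t1 m (s1i m hm)
        · rcases List.mem_cons.1 he' with rfl | he''
          · exact t1 m ((s1ii m).2 (Or.inr hor))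
          · exact (t2 m).2 (Or.inr ⟨e', he'', hor⟩)
    · intro x
      constructor
      · intro hx
        rcases (t3 x).1 hx with hx1 | ⟨hxf, hxs⟩
        · rcases (s1iii x).1 hx1 with hxq | ⟨hxs1, hxc⟩
          · exact Or.inl hxq
          · exact Or.inr ⟨t1 x hxs1, hxc⟩
        · by_cases hxc : x ∈ c
          · exact absurd (s1i x hxc) hxs
          · exact Or.inr ⟨hxf, hxc⟩
      · rintro (hxq | ⟨hxf, hxc⟩)
        · exact (t3 x).2 (Or.inl ((s1iii x).2 (Or.inl hxq)))
        · by_cases hxs1 : x ∈ (pvBfsStep u (c, q) e).1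
          · exact (t3 x).2 (Or.inl ((s1iii x).2 (Or.inr ⟨hxs1, hxc⟩)))
          · exact (t3 x).2 (Or.inr ⟨hxf, hxs1⟩)
    · exact le_trans t4 s1iv
    · intro hc'
      exact t5 (s1v hc')

theorem pvBfs_sound (E : List (List Int)) (n : Int) :
    ∀ (f : Nat) (q : List Int) (c : PySem.Set Int),
      (∀ u ∈ q, pvConn E n u) → (∀ x ∈ c, pvConn E n x) →
      ∀ m ∈ pvBfs E f q c, pvConn E n m := by
  intro f
  induction f with
  | zero =>
    intro q c _ hc m hm
    simp only [pvBfs] at hm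
    exact hc m hm
  | succ f ih =>
    intro q c hq hc m hm
    cases q with
    | nil =>
      simp only [pvBfs] at hm
      exact hc m hm
    | cons u qt =>
      simp only [pvBfs] at hm
      obtain ⟨s1, s2, s3, _, _⟩ := pvBfsScan_spec E u E (fun e he => he) c qt
      have hcu : pvConn E n u := hq u List.mem_cons_self
      have hc' : ∀ x ∈ (E.foldl (fun s e => pvBfsStep u s e) (c, qt)).1, pvConn E n x := by
        intro x hx
        rcases (s2 x).1 hx with hx1 | ⟨e, he, hor⟩
        · exact hc x hx1
        · refine pvConn_step hcu ⟨e, he, ?_⟩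
          tauto
      have hq' : ∀ x ∈ (E.foldl (fun s e => pvBfsStep u s e) (c, qt)).2, pvConn E n x := by
        intro x hx
        rcases (s3 x).1 hx with hx1 | ⟨hx2, _⟩
        · exact hq x (List.mem_cons_of_mem u hx1)
        · exact hc' x hx2
      exact ih _ _ hq' hc' m hm

theorem pvBfs_closed (E : List (List Int)) :
    ∀ (f : Nat) (q : List Int) (c : PySem.Set Int),
      (∀ u ∈ q, u ∈ c) →
      (∀ x ∈ c, x ∈ pvNodes E) →
      (∀ m ∈ c, m ∉ q → ∀ y ∈ pvAdj E m, y ∈ c) →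
      (q.length + ((pvNodes E).filter (fun y => !decide (y ∈ c))).length < f) →
      (∀ x ∈ c, x ∈ pvBfs E f q c) ∧
      (∀ m ∈ pvBfs E f q c, ∀ y ∈ pvAdj E m, y ∈ pvBfs E f q c) := by
  intro f
  induction f with
  | zero =>
    intro q c _ _ _ hf
    exact absurd hf (Nat.not_lt_zero _)
  | succ f ih =>
    intro q c hqc hck hcl hf
    cases q with
    | nil =>
      simp only [pvBfs]
      exact ⟨fun x hx => hx, fun m hm y hy => hcl m hm (List.not_mem_nil) y hy⟩
    | cons u qt =>
      simp only [pvBfs]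
      obtain ⟨s1, s2, s3, s4, _⟩ := pvBfsScan_spec E u E (fun e he => he) c qt
      have hqc' : ∀ x ∈ (E.foldl (fun s e => pvBfsStep u s e) (c, qt)).2,
          x ∈ (E.foldl (fun s e => pvBfsStep u s e) (c, qt)).1 := by
        intro x hx
        rcases (s3 x).1 hx with hx1 | ⟨hx2, _⟩
        · exact s1 x (hqc x (List.mem_cons_of_mem u hx1))
        · exact hx2
      have hck' : ∀ x ∈ (E.foldl (fun s e => pvBfsStep u s e) (c, qt)).1, x ∈ pvNodes E := by
        intro x hx
        rcases (s2 x).1 hx with hx1 | ⟨e, he, hor⟩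
        · exact hck x hx1
        · rcases hor with ⟨_, h⟩ | ⟨_, h⟩
          · exact (pvMem_nodes E x).2 ⟨e, he, Or.inr h.symm⟩
          · exact (pvMem_nodes E x).2 ⟨e, he, Or.inl h.symm⟩
      have hcl' : ∀ m ∈ (E.foldl (fun s e => pvBfsStep u s e) (c, qt)).1,
          m ∉ (E.foldl (fun s e => pvBfsStep u s e) (c, qt)).2 →
          ∀ y ∈ pvAdj E m, y ∈ (E.foldl (fun s e => pvBfsStep u s e) (c, qt)).1 := by
        intro m hm hmr2 y hy
        by_cases hmc : m ∈ c
        · by_cases hmu : m = u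
          · subst hmu
            obtain ⟨e, he, hor⟩ := (pvEdgeDict_getD E m y).1 hy
            refine (s2 y).2 (Or.inr ⟨e, he, ?_⟩)
            tauto
          · have hmqt : m ∉ qt := fun hqt => hmr2 ((s3 m).2 (Or.inl hqt))
            exact s1 y (hcl m hmc (by simp [hmu, hmqt]) y hy)
        · exact absurd ((s3 m).2 (Or.inr ⟨hm, hmc⟩)) hmr2
      have hf' : (E.foldl (fun s e => pvBfsStep u s e) (c, qt)).2.length
          + ((pvNodes E).filter (fun y => !decide (y ∈ (E.foldl (fun s e => pvBfsStep u s e) (c, qt)).1))).length < f := by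
        simp only [List.length_cons] at hf
        omega
      obtain ⟨c1, c2⟩ := ih _ _ hqc' hck' hcl' hf'
      exact ⟨fun x hx => c1 x (s1 x hx), c2⟩

theorem pvBfs_nodup (E : List (List Int)) :
    ∀ (f : Nat) (q : List Int) (c : PySem.Set Int), c.Nodup → (pvBfs E f q c).Nodup := by
  intro f
  induction f with
  | zero => intro q c hc; simpa [pvBfs] using hc
  | succ f ih =>
    intro q c hc
    cases q with
    | nil => simpa [pvBfs] using hc
    | cons u qt =>
      simp only [pvBfs]
      obtain ⟨_, _, _, _, s5⟩ := pvBfsScan_spec E u E (fun e he => he) c qt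
      exact ih _ _ (s5 hc)

theorem pvBfs_mem (E : List (List Int)) (n : Int) (hn : n ∈ pvNodes E) (m : Int) :
    m ∈ pvBfs E ((pvNodes E).length + 1) [n] (PySem.Set.add PySem.Set.empty n) ↔ pvConn E n m := by
  constructor
  · intro h
    refine pvBfs_sound E n _ _ _ ?_ ?_ m h
    · intro u hu
      rcases List.mem_cons.1 hu with rfl | h'
      · exact Relation.ReflTransGen.refl
      · simp at h'
    · intro x hx
      rcases (PySem.Set.mem_add PySem.Set.empty n x).1 hx with h' | rfl
      · simp [PySem.Set.empty] at h'
      · exact Relation.ReflTransGen.refl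
  · intro h
    have hfl := pvFilterLt (pvNodes E) (fun y => !decide (y ∈ PySem.Set.add PySem.Set.empty n))
      (fun _ => true) (fun _ _ _ => rfl) n hn rfl (by simp [PySem.Set.mem_add])
    rw [List.filter_true] at hfl
    obtain ⟨hc1, hc2⟩ := pvBfs_closed E ((pvNodes E).length + 1) [n] (PySem.Set.add PySem.Set.empty n)
      (by
        intro u hu
        rcases List.mem_cons.1 hu with rfl | h'
        · exact (PySem.Set.mem_add _ _ _).2 (Or.inr rfl)
        · simp at h')
      (by
        intro x hx
        rcases (PySem.Set.mem_add _ _ _).1 hx with h' | rfl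
        · simp [PySem.Set.empty] at h'
        · exact hn)
      (by
        intro m' hm' hm'' y hy
        rcases (PySem.Set.mem_add _ _ _).1 hm' with h' | rfl
        · simp [PySem.Set.empty] at h'
        · exact absurd (List.mem_cons_self) hm'')
      (by
        simp only [List.length_cons, List.length_nil]
        omega)
    have hnR : n ∈ pvBfs E ((pvNodes E).length + 1) [n] (PySem.Set.add PySem.Set.empty n) :=
      hc1 n ((PySem.Set.mem_add _ _ _).2 (Or.inr rfl))
    induction h with
    | refl => exact hnR
    | tail hab hbc ihc => exact hc2 _ ihc _ ((pvEdgeDict_getD E _ _).2 hbc)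

-- ---- the two outer loops produce pointwise-equal component lists ----
def pvRel (E : List (List Int)) (gA gB : PySem.Set Int) : Prop :=
  ∃ n, n ∈ pvNodes E ∧ (∀ x, x ∈ gA ↔ pvConn E n x) ∧ (∀ x, x ∈ gB ↔ pvConn E n x)
    ∧ gA.Nodup ∧ gB.Nodup

theorem pvForall₂_concat {α β : Type} {R : α → β → Prop} :
    ∀ {l1 : List α} {l2 : List β} {a : α} {b : β},
      List.Forall₂ R l1 l2 → R a b → List.Forall₂ R (l1 ++ [a]) (l2 ++ [b]) := by
  intro l1 l2 a b h hr
  induction h with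
  | nil => exact List.Forall₂.cons hr List.Forall₂.nil
  | cons hab _ ih => exact List.Forall₂.cons hab ih

theorem pvOuter (E : List (List Int)) :
    ∀ (l : List Int), (∀ x ∈ l, x ∈ pvNodes E) →
    ∀ (accA accB : List (PySem.Set Int)) (vA vB : PySem.Set Int),
      (∀ x, x ∈ vA ↔ x ∈ vB) →
      List.Forall₂ (pvRel E) accA accB →
      List.Forall₂ (pvRel E)
        (l.foldl (fun (acc : List (PySem.Set Int) × PySem.Set Int) node =>
            if node ∈ acc.2 then acc
            else
              let g := pvDfs (pvEdgeDict E) ((pvEdgeDict E).keys.length + 1) node PySem.Set.empty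
              (acc.1 ++ [g], PySem.Set.update acc.2 g)) (accA, vA)).1
        (l.foldl (fun (acc : List (PySem.Set Int) × PySem.Set Int) n =>
            if n ∈ acc.2 then acc
            else
              let c := pvBfs E ((pvNodes E).length + 1) [n] (PySem.Set.add PySem.Set.empty n)
              (acc.1 ++ [c], PySem.Set.union acc.2 c)) (accB, vB)).1 := by
  intro l
  induction l with
  | nil => intro _ accA accB vA vB _ hacc; simpa using hacc
  | cons n t ih =>
    intro hl accA accB vA vB hv hacc
    have htl : ∀ x ∈ t, x ∈ pvNodes E := fun x hx => hl x (List.mem_cons_of_mem n hx)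
    have hnK : n ∈ pvNodes E := hl n List.mem_cons_self
    rw [List.foldl_cons, List.foldl_cons]
    by_cases hn : n ∈ vA
    · have hn' : n ∈ vB := (hv n).1 hn
      simp only [hn, hn', if_pos]
      exact ih htl accA accB vA vB hv hacc
    · have hn' : n ∉ vB := fun hc => hn ((hv n).2 hc)
      simp only [hn, hn', if_false]
      have hmemg : ∀ x, x ∈ pvDfs (pvEdgeDict E) ((pvEdgeDict E).keys.length + 1) n PySem.Set.empty ↔ pvConn E n x :=
        fun x => pvDfs_mem E n hnK x
      have hmemc : ∀ x, x ∈ pvBfs E ((pvNodes E).length + 1) [n] (PySem.Set.add PySem.Set.empty n) ↔ pvConn E n x :=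
        fun x => pvBfs_mem E n hnK x
      have hrel : pvRel E (pvDfs (pvEdgeDict E) ((pvEdgeDict E).keys.length + 1) n PySem.Set.empty)
          (pvBfs E ((pvNodes E).length + 1) [n] (PySem.Set.add PySem.Set.empty n)) :=
        ⟨n, hnK, hmemg, hmemc, pvDfs_nodup E _ n _ (by simp [PySem.Set.empty]),
          pvBfs_nodup E _ _ _ (by simp [PySem.Set.empty, PySem.Set.add])⟩
      apply ih htl _ _ _ _ ?_ (pvForall₂_concat hacc hrel)
      intro x
      rw [PySem.Set.mem_update, PySem.Set.mem_union]
      constructor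
      · rintro (hx | hx)
        · exact Or.inl ((hv x).1 hx)
        · exact Or.inr ((hmemc x).2 ((hmemg x).1 hx))
      · rintro (hx | hx)
        · exact Or.inl ((hv x).2 hx)
        · exact Or.inr ((hmemg x).2 ((hmemc x).1 hx))

-- ---- the per-component outputs agree ----
theorem pvSorted2_eq_sorted {α : Type} (xs : List α) (k1 k2 : α → Int) :
    PySem.List.sorted2 xs k1 k2 = PySem.List.sorted xs (fun a => toLex (k1 a, k2 a)) := by
  have hb : (fun a b => decide (k1 a < k1 b) || (!decide (k1 b < k1 a) && decide (k2 a < k2 b)))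
      = (fun a b : α => decide (toLex (k1 a, k2 a) < toLex (k1 b, k2 b))) := by
    funext a b
    rcases lt_trichotomy (k1 a) (k1 b) with h | h | h
    · simp [Prod.Lex.lt_iff, h]
    · simp [Prod.Lex.lt_iff, h, lt_irrefl]
    · simp [Prod.Lex.lt_iff, h, lt_asymm h, h.ne']
  simp only [PySem.List.sorted2, PySem.List.sorted, Bool.false_eq_true, if_false, hb]

theorem pvSorted2A (xs : List (List Int)) :
    PySem.List.sorted2 xs (fun x => PySem.List.pyGetD x 0 0) (fun x => PySem.List.pyGetD x 1 0)
      = PySem.List.sorted xs (fun m => toLex (PySem.List.pyGetD m 0 0, PySem.List.pyGetD m 1 0)) := by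
  rw [pvSorted2_eq_sorted]

theorem pvSorted2B (xs : List (Int × Int)) :
    PySem.List.sorted2 xs (fun p => p.1) (fun p => p.2)
      = PySem.List.sorted xs (fun p => toLex (p.1, p.2)) := by
  rw [pvSorted2_eq_sorted]

theorem pvPairsA_inner (node : Int) :
    ∀ (l : List Int) (acc : List (List Int)),
      l.foldl (fun ps2 nb => if node < nb then ps2 ++ [[node, nb]] else ps2) acc
        = acc ++ (l.filter (fun nb => decide (node < nb))).map (fun nb => [node, nb]) := by
  intro l
  induction l with
  | nil => intro acc; simp
  | cons a t ih =>
    intro acc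
    rw [List.foldl_cons]
    by_cases h : node < a
    · simp [h, List.filter_cons, ih]
    · simp [h, List.filter_cons, ih]

theorem pvPairsA_eq (E : List (List Int)) (g : PySem.Set Int) :
    pvPairsA (pvEdgeDict E) g =
      (PySem.List.sorted g (fun x => x)).flatMap
        (fun node => ((pvAdj E node).filter (fun nb => decide (node < nb))).map (fun nb => [node, nb])) := by
  unfold pvPairsA
  have h : ∀ (l : List Int) (acc : List (List Int)),
      l.foldl (fun ps node => ((pvEdgeDict E).getD node PySem.Set.empty).foldl (fun ps2 nb =>
        if node < nb then ps2 ++ [[node, nb]] else ps2) ps) acc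
        = acc ++ l.flatMap (fun node => ((pvAdj E node).filter (fun nb => decide (node < nb))).map (fun nb => [node, nb])) := by
    intro l
    induction l with
    | nil => intro acc; simp
    | cons a t ih =>
      intro acc
      rw [List.foldl_cons, pvPairsA_inner]
      rw [ih]
      simp [pvAdj]
  simpa using h (PySem.List.sorted g (fun x => x)) []

theorem pvPairsA_mem (E : List (List Int)) (g : PySem.Set Int) (m : List Int) :
    m ∈ pvPairsA (pvEdgeDict E) g ↔
      ∃ x y : Int, x ∈ g ∧ y ∈ pvAdj E x ∧ x < y ∧ m = [x, y] := by
  rw [pvPairsA_eq]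
  simp only [List.mem_flatMap, List.mem_map, List.mem_filter, PySem.List.mem_sorted,
    decide_eq_true_eq]
  constructor
  · rintro ⟨x, hx, nb, ⟨hnb, hlt⟩, rfl⟩
    exact ⟨x, nb, hx, hnb, hlt, rfl⟩
  · rintro ⟨x, y, hx, hy, hlt, rfl⟩
    exact ⟨x, hx, y, ⟨hy, hlt⟩, rfl⟩

theorem pvPairsA_nodup (E : List (List Int)) (g : PySem.Set Int) (hg : g.Nodup) :
    (pvPairsA (pvEdgeDict E) g).Nodup := by
  rw [pvPairsA_eq, List.nodup_flatMap]
  constructor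
  · intro x _
    apply List.Nodup.map
    · intro a b hab; simpa using hab
    · exact List.Nodup.filter _ (pvAdj_nodup E x)
  · have hnd : (PySem.List.sorted g (fun x => x)).Nodup := by
      have hperm := PySem.List.sorted_perm g (fun x => x) false
      exact (List.Perm.nodup_iff hperm).2 hg
    refine hnd.imp ?_
    intro a b hab
    intro m hm1 hm2
    simp only [List.mem_map, List.mem_filter] at hm1 hm2
    obtain ⟨nb1, _, rfl⟩ := hm1
    obtain ⟨nb2, _, heq⟩ := hm2
    injection heq with hhead _
    exact hab hhead.symm

theorem pvPairsB_mem (E : List (List Int)) (c : PySem.Set Int) (p : Int × Int) :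
    p ∈ pvPairsB E c ↔
      ∃ e ∈ E, (pvFst e ≠ pvSnd e ∧ pvFst e ∈ c) ∧
        p = (min (pvFst e) (pvSnd e), max (pvFst e) (pvSnd e)) := by
  unfold pvPairsB
  suffices h : ∀ (L : List (List Int)) (s : PySem.Set (Int × Int)),
      p ∈ L.foldl (fun ps e => if pvFst e ≠ pvSnd e ∧ pvFst e ∈ c
          then PySem.Set.add ps (min (pvFst e) (pvSnd e), max (pvFst e) (pvSnd e)) else ps) s
        ↔ p ∈ s ∨ ∃ e ∈ L, (pvFst e ≠ pvSnd e ∧ pvFst e ∈ c) ∧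
            p = (min (pvFst e) (pvSnd e), max (pvFst e) (pvSnd e)) by
    rw [h E PySem.Set.empty]
    simp [PySem.Set.empty]
  intro L
  induction L with
  | nil => intro s; simp
  | cons e t ih =>
    intro s
    rw [List.foldl_cons]
    by_cases hcond : pvFst e ≠ pvSnd e ∧ pvFst e ∈ c
    · rw [if_pos hcond, ih]
      constructor
      · rintro (hs | ⟨e', he', h'⟩)
        · rcases (PySem.Set.mem_add _ _ _).1 hs with hs' | rfl
          · exact Or.inl hs'
          · exact Or.inr ⟨e, List.mem_cons_self, hcond, rfl⟩
        · exact Or.inr ⟨e', List.mem_cons_of_mem e he', h'⟩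
      · rintro (hs | ⟨e', he'', h'⟩)
        · exact Or.inl ((PySem.Set.mem_add _ _ _).2 (Or.inl hs))
        · rcases List.mem_cons.1 he'' with rfl | he'
          · exact Or.inl ((PySem.Set.mem_add _ _ _).2 (Or.inr h'.2))
          · exact Or.inr ⟨e', he', h'⟩
    · rw [if_neg hcond, ih]
      constructor
      · rintro (hs | ⟨e', he', h'⟩)
        · exact Or.inl hs
        · exact Or.inr ⟨e', List.mem_cons_of_mem e he', h'⟩
      · rintro (hs | ⟨e', he'', h'⟩)
        · exact Or.inl hs
        · rcases List.mem_cons.1 he'' with rfl | he'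
          · exact absurd h'.1 hcond
          · exact Or.inr ⟨e', he', h'⟩

theorem pvPairsB_nodup (E : List (List Int)) (c : PySem.Set Int) : (pvPairsB E c).Nodup := by
  unfold pvPairsB
  suffices h : ∀ (L : List (List Int)) (s : PySem.Set (Int × Int)), s.Nodup →
      (L.foldl (fun ps e => if pvFst e ≠ pvSnd e ∧ pvFst e ∈ c
          then PySem.Set.add ps (min (pvFst e) (pvSnd e), max (pvFst e) (pvSnd e)) else ps) s).Nodup by
    exact h E PySem.Set.empty (by simp [PySem.Set.empty])
  intro L
  induction L with
  | nil => intro s hs; exact hs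
  | cons e t ih =>
    intro s hs
    rw [List.foldl_cons]
    by_cases hcond : pvFst e ≠ pvSnd e ∧ pvFst e ∈ c
    · rw [if_pos hcond]
      exact ih _ (PySem.Set.nodup_add _ _ hs)
    · rw [if_neg hcond]
      exact ih _ hs

theorem pvPairsB_mem_iff (E : List (List Int)) (n : Int) (c : PySem.Set Int)
    (hc : ∀ x, x ∈ c ↔ pvConn E n x) (p : Int × Int) :
    p ∈ pvPairsB E c ↔ pvConn E n p.1 ∧ pvStep E p.1 p.2 ∧ p.1 < p.2 := by
  rw [pvPairsB_mem]
  constructor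
  · rintro ⟨e, he, ⟨hne, hmem⟩, rfl⟩
    have hstep : pvStep E (pvFst e) (pvSnd e) := ⟨e, he, Or.inl ⟨rfl, rfl⟩⟩
    have hconnA : pvConn E n (pvFst e) := (hc _).1 hmem
    rcases lt_or_gt_of_ne hne with hab | hba
    · refine ⟨?_, ?_, ?_⟩
      · simpa [min_eq_left hab.le] using hconnA
      · simpa [min_eq_left hab.le, max_eq_right hab.le] using hstep
      · simpa [min_eq_left hab.le, max_eq_right hab.le] using hab
    · have hconnB : pvConn E n (pvSnd e) := pvConn_step hconnA hstep
      refine ⟨?_, ?_, ?_⟩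
      · simpa [min_eq_right hba.le] using hconnB
      · simpa [min_eq_right hba.le, max_eq_left hba.le] using pvStep_symm hstep
      · simpa [min_eq_right hba.le, max_eq_left hba.le] using hba
  · rintro ⟨hconn, hstep, hlt⟩
    obtain ⟨e, he, hor⟩ := hstep
    rcases hor with ⟨hf, hs⟩ | ⟨hf, hs⟩
    · refine ⟨e, he, ⟨?_, ?_⟩, ?_⟩
      · rw [hf, hs]; exact hlt.ne
      · rw [hf]; exact (hc _).2 hconn
      · rw [hf, hs, min_eq_left hlt.le, max_eq_right hlt.le]
    · refine ⟨e, he, ⟨?_, ?_⟩, ?_⟩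
      · rw [hf, hs]; exact hlt.ne'
      · rw [hf]
        exact (hc _).2 (pvConn_step hconn ⟨e, he, Or.inr ⟨hf, hs⟩⟩)
      · rw [hf, hs, min_eq_right hlt.le, max_eq_left hlt.le]

theorem pvGetD1 (a b : Int) : PySem.List.pyGetD [a, b] 1 0 = b := by
  have h := PySem.List.pyGetD_natCast (xs := [a, b]) (n := 1) (d := 0)
  simpa using h

theorem pvComponentOut (E : List (List Int)) (gA gB : PySem.Set Int) (h : pvRel E gA gB) :
    PySem.List.sorted2 (pvPairsA (pvEdgeDict E) gA)
        (fun x => PySem.List.pyGetD x 0 0) (fun x => PySem.List.pyGetD x 1 0)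
      = (PySem.List.sorted2 (pvPairsB E gB) (fun p => p.1) (fun p => p.2)).map
          (fun p => [p.1, p.2]) := by
  obtain ⟨n, hn, hA, hB, hAnd, hBnd⟩ := h
  rw [pvSorted2A, pvSorted2B]
  have hkey : ∀ p : Int × Int,
      (fun m => toLex (PySem.List.pyGetD m 0 0, PySem.List.pyGetD m 1 0)) ([p.1, p.2])
        = toLex (p.1, p.2) := by
    intro p
    simp [PySem.List.pyGetD_zero_cons, pvGetD1]
  have hSperm := PySem.List.sorted_perm (pvPairsB E gB) (fun p => toLex (p.1, p.2)) false
  have hSnd : (PySem.List.sorted (pvPairsB E gB) (fun p => toLex (p.1, p.2))).Nodup :=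
    (List.Perm.nodup_iff hSperm).2 (pvPairsB_nodup E gB)
  have hSle := PySem.List.sorted_pairwise (pvPairsB E gB) (fun p => toLex (p.1, p.2))
  have hSlt : (PySem.List.sorted (pvPairsB E gB) (fun p => toLex (p.1, p.2))).Pairwise
      (fun a b => toLex (a.1, a.2) < toLex (b.1, b.2)) := by
    refine (List.Pairwise.and hSle hSnd).imp ?_
    rintro a b ⟨hle, hne⟩
    refine lt_of_le_of_ne hle ?_
    intro hk
    apply hne
    have h2 := congrArg ofLex hk
    simpa using Prod.ext (congrArg Prod.fst h2) (congrArg Prod.snd h2)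
  have hinj : Function.Injective (fun p : Int × Int => [p.1, p.2]) := by
    intro p q hpq
    simp only [List.cons.injEq, and_true] at hpq
    exact Prod.ext hpq.1 hpq.2
  apply PySem.List.sorted_eq_of_perm_of_pairwise_lt
  · refine (List.perm_ext_iff_of_nodup ?_ ?_).2 ?_
    · exact hSnd.map hinj
    · exact pvPairsA_nodup E gA hAnd
    · intro m
      constructor
      · intro hm
        obtain ⟨p, hpS, rfl⟩ := List.mem_map.1 hm
        have hp := (pvPairsB_mem_iff E n gB hB p).1
          ((PySem.List.mem_sorted _ _ _ _).1 hpS)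
        obtain ⟨hconn, hstep, hlt⟩ := hp
        exact (pvPairsA_mem E gA _).2
          ⟨p.1, p.2, (hA p.1).2 hconn, (pvEdgeDict_getD E p.1 p.2).2 hstep, hlt, rfl⟩
      · intro hm
        obtain ⟨x, y, hx, hy, hlt, rfl⟩ := (pvPairsA_mem E gA _).1 hm
        have hmemB : (x, y) ∈ pvPairsB E gB :=
          (pvPairsB_mem_iff E n gB hB (x, y)).2
            ⟨(hA x).1 hx, (pvEdgeDict_getD E x y).1 hy, hlt⟩
        exact List.mem_map.2 ⟨(x, y), (PySem.List.mem_sorted _ _ _ _).2 hmemB, rfl⟩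
  · rw [List.pairwise_map]
    refine hSlt.imp ?_
    intro a b hab
    simpa [hkey] using hab

-- ---- assembly ----
theorem pvFoldConcatMap {α β : Type} (f : α → β) :
    ∀ (l : List α) (acc : List β), l.foldl (fun acc x => acc ++ [f x]) acc = acc ++ l.map f := by
  intro l
  induction l with
  | nil => intro acc; simp
  | cons a t ih => intro acc; rw [List.foldl_cons, ih]; simp

theorem pvMapCongr {α β γ : Type} (R : α → β → Prop) (f : α → γ) (g : β → γ)
    (hfg : ∀ a b, R a b → f a = g b) :
    ∀ {l1 : List α} {l2 : List β}, List.Forall₂ R l1 l2 → l1.map f = l2.map g := by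
  intro l1 l2 h
  induction h with
  | nil => rfl
  | cons hab _ ih => simp only [List.map_cons, hfg _ _ hab, ih]

-- ===== VERDICT (by name: the statement is the Claim_ definition above) =====
theorem find_connected_groups_spec : Claim_equal_find_connected_groups := by
  unfold Claim_equal_find_connected_groups
  intro E _ _
  unfold Spec_find_connected_groups
  show find_connected_groups E = find_connected_groups_alt E
  unfold find_connected_groups find_connected_groups_alt
  simp only []
  rw [pvFoldConcatMap, pvOrderFold_eq]
  simp only [List.nil_append]
  apply pvMapCongr (pvRel E)
  · intro a b hab
    exact pvComponentOut E a b hab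
  · have h := pvOuter E (pvNodes E) (fun x hx => hx) [] [] PySem.Set.empty PySem.Set.empty
      (fun x => Iff.rfl) List.Forall₂.nil
    unfold pvGroupsA pvCompsB
    exact h
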